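-- pv_equiv track=rewrite | github.com/ucrbioinfo/OMGS | scripts/full_order.py | check_full_order
-- ===== SOURCE A (Python) =====
-- def check_full_order(graph_unsorted):
--     """
--     Repeatedly go through all of the nodes in the graph, moving each of
--     the nodes that has all its edges resolved, onto a sequence that
--     forms our sorted graph. A node has all of its edges resolved and
--     can be moved once all the nodes its edges point to, have been moved
--     from the unsorted graph onto the sorted one.
--     """
--
--     # This is the list we'll return, that stores each node/edges pair
--     # in topological order.
--     graph_sorted = []
--
--     # Convert the unsorted graph into a hash table. This gives us
--     # constant-time lookup for checking if edges are unresolved, and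
--     # for removing nodes from the unsorted graph.
--     graph_unsorted = dict(graph_unsorted)
--
--     # Run until the unsorted graph is empty.
--     while graph_unsorted:
--
--         # Go through each of the node/edges pairs in the unsorted
--         # graph. If a set of edges doesn't contain any nodes that
--         # haven't been resolved, that is, that are still in the
--         # unsorted graph, remove the pair from the unsorted graph,
--         # and append it to the sorted graph. Note here that by using
--         # using the items() method for iterating, a copy of the
--         # unsorted graph is used, allowing us to modify the unsorted
--         # graph as we move through it. We also keep a flag for
--         # checking that that graph is acyclic, which is true if any
--         # nodes are resolved during each pass through the graph. If
--         # not, we need to bail out as the graph therefore can't be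
--         # sorted.
--         acyclic = False
--         candidate_set = []
--         for node, edges in list(graph_unsorted.items()):
--             for edge in edges:
--                 if edge in graph_unsorted:
--                     break
--             else:
--                 acyclic = True
--                 candidate_set.append(node)
--
--         if not acyclic:
--             return False
--         if len(candidate_set) > 1:
--             return False
--
--         node = candidate_set[0]
--         del graph_unsorted[node]
--
--     return True
-- ===== SOURCE B (Python) =====
-- def check_full_order(graph_unsorted):
--     # Kahn-style: indegree-like counts of unresolved out-edges plus a reverse
--     # adjacency index; each step must have exactly one resolvable node.
--     g = dict(graph_unsorted)
--     counts = {}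
--     rev = {}
--     for node, edges in g.items():
--         c = 0
--         for t in edges:
--             if t in g:
--                 c += 1
--                 rev.setdefault(t, []).append(node)
--         counts[node] = c
--     zeros = [n for n, c in counts.items() if c == 0]
--     remaining = len(counts)
--     while remaining:
--         if len(zeros) != 1:
--             return False
--         node = zeros.pop()
--         del counts[node]
--         remaining -= 1
--         for src in rev.get(node, []):
--             if src in counts:
--                 counts[src] -= 1
--                 if counts[src] == 0:
--                     zeros.append(src)
--     return True
-- ===== Notes on version B (the rewrite author's own statement) =====
-- stated objective: alternative
-- what changed: A rescans every remaining node's whole edge list against the dict on every round (and must see exactly one resolvable node per round); B runs a Kahn-style elimination instead: it counts each node's unresolved out-edges once, builds a reverse index, and after removing the unique zero-count node decrements only the counters of its in-neighbours, maintaining the zero-count list incrementally.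
import Mathlib
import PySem

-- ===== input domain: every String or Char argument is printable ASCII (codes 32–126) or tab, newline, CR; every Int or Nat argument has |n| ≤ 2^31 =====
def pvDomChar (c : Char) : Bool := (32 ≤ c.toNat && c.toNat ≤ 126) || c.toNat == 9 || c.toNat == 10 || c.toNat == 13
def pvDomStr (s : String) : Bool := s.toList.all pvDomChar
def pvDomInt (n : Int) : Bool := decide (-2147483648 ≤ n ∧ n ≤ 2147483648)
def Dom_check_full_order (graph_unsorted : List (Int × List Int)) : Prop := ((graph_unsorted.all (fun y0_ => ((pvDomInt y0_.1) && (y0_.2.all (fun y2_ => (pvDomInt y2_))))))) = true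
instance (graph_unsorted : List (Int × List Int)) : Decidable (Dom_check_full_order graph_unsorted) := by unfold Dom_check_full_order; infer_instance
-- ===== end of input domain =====

-- B replaces A's repeated full rescans of every node's edge list by a Kahn-style elimination
-- over unresolved-edge counters with a reverse index (a different algorithm, same return value).

-- ===== PORT A =====
-- One pass of A's `for node, edges in items(): for edge in edges: if edge in d: break / else: append`:
-- returns (acyclic flag, candidate_set).
def aScan (D : PySem.Dict Int (List Int)) : Bool × List Int :=
  D.items.foldl (fun st p =>
    if p.2.any (fun e => D.contains e) then st else (true, st.2 ++ [p.1])) (false, [])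

-- helper lemmas cited by aLoop's decreasing_by (termination of A's while loop)
theorem foldl_flag_append {α β : Type} (c : α → Bool) (f : α → β) (l : List α)
    (b : Bool) (acc : List β) :
    l.foldl (fun st p => if c p then st else (true, st.2 ++ [f p])) (b, acc)
      = (b || l.any (fun p => !c p), acc ++ (l.filter (fun p => !c p)).map f) := by
  induction l generalizing b acc with
  | nil => simp
  | cons x xs ih =>
    by_cases hx : c x = true
    · simp [hx, ih]
    · simp [List.foldl_cons, hx, ih]

theorem aScan_eq (D : PySem.Dict Int (List Int)) :
    aScan D = (D.items.any (fun p => !(p.2.any (fun e => D.contains e))),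
      (D.items.filter (fun p => !(p.2.any (fun e => D.contains e)))).map (fun p => p.1)) := by
  simpa [aScan] using foldl_flag_append
    (fun p => p.2.any (fun e => D.contains e)) (fun p : Int × List Int => p.1) D.items false []

theorem aScan_fst_iff (D : PySem.Dict Int (List Int)) :
    (aScan D).1 = true ↔ (aScan D).2 ≠ [] := by
  rw [aScan_eq]
  simp [List.any_eq_true, List.eq_nil_iff_forall_not_mem]

theorem aScan_snd_sub (D : PySem.Dict Int (List Int)) {n : Int} (h : n ∈ (aScan D).2) :
    n ∈ D.keys := by
  rw [aScan_eq] at h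
  simp only [List.mem_map, List.mem_filter] at h
  obtain ⟨p, ⟨hp, _⟩, rfl⟩ := h
  exact List.mem_map_of_mem hp

theorem size_erase_lt_of_mem (D : PySem.Dict Int (List Int)) {n : Int} (h : n ∈ D.keys) :
    (D.erase n).size < D.size := by
  simp only [PySem.Dict.keys, List.mem_map] at h
  obtain ⟨p, hp, rfl⟩ := h
  simp only [PySem.Dict.erase, PySem.Dict.size]
  exact List.length_filter_lt_length_iff_exists.mpr ⟨p, hp, by simp⟩

-- A's while loop (the dict shrinks by the erased candidate_set[0] each round);
-- candidate_set[0] is `headI`, taken under the guard that candidate_set is nonempty (acyclic).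
def aLoop (D : PySem.Dict Int (List Int)) : Bool :=
  if D.size = 0 then true
  else
    let st := aScan D
    if hac : !st.1 then false
    else if 1 < st.2.length then false
    else aLoop (D.erase st.2.headI)
termination_by D.size
decreasing_by
  refine size_erase_lt_of_mem D (aScan_snd_sub D ?_)
  have hne : (aScan D).2 ≠ [] := (aScan_fst_iff D).mp (by simpa using hac)
  obtain ⟨a, t, hl⟩ := List.exists_cons_of_ne_nil hne
  rw [hl]
  exact List.mem_cons_self

def check_full_order (graph_unsorted : List (Int × List Int)) : Bool :=
  aLoop (PySem.Dict.ofList graph_unsorted)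

-- ===== PORT B =====
-- B's while loop: `remaining` (a Nat counter, as in Source B) drives the recursion;
-- counts[src] -= 1 is `modify src 0 (· - 1)` (src is present: guarded by `contains`).
def bLoop (rev : PySem.Dict Int (List Int)) (counts : PySem.Dict Int Int)
    (zeros : List Int) : Nat → Bool
  | 0 => true
  | r + 1 =>
    if zeros.length ≠ 1 then false
    else
      match zeros with
      | [z] =>
        let cz := (rev.getD z []).foldl (fun (cz : PySem.Dict Int Int × List Int) src =>
          if cz.1.contains src then
            let c2 := cz.1.modify src 0 (fun c => c - 1)
            if c2.getD src 0 == 0 then (c2, cz.2 ++ [src]) else (c2, cz.2)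
          else cz) (counts.erase z, [])
        bLoop rev cz.1 cz.2 r
      | _ => false             -- unreachable: zeros.length = 1

def check_full_order_alt (graph_unsorted : List (Int × List Int)) : Bool :=
  let g := PySem.Dict.ofList graph_unsorted
  let cr := g.items.foldl (fun (cr : PySem.Dict Int Int × PySem.Dict Int (List Int)) p =>
    let crev := p.2.foldl (fun (s : Int × PySem.Dict Int (List Int)) t =>
      if g.contains t then (s.1 + 1, s.2.modify t [] (fun l => l ++ [p.1])) else s) (0, cr.2)
    (cr.1.insert p.1 crev.1, crev.2)) (PySem.Dict.empty, PySem.Dict.empty)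
  let zeros := (cr.1.items.filter (fun p => p.2 == 0)).map (fun p => p.1)
  bLoop cr.2 cr.1 zeros cr.1.size

-- ===== PRECONDITION & SPEC =====
def Spec_check_full_order (graph_unsorted : List (Int × List Int)) (out : Bool) : Prop := out = check_full_order_alt graph_unsorted
instance (graph_unsorted : List (Int × List Int)) (out : Bool) : Decidable (Spec_check_full_order graph_unsorted out) := by unfold Spec_check_full_order; infer_instance

-- ===== CLAIM (what is proved, stated in full; the proofs are below) =====
def Claim_equal_check_full_order : Prop := ∀ (graph_unsorted : List (Int × List Int)), Dom_check_full_order graph_unsorted → Spec_check_full_order graph_unsorted (check_full_order graph_unsorted)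

-- ===== LEMMAS AND PROOFS =====

-- number of edges of `e` whose target is still unresolved (present in D)
def liveCnt (D : PySem.Dict Int (List Int)) (e : List Int) : Nat :=
  (e.filter (fun t => D.contains t)).length

-- the fold function of bLoop's inner decrement loop, named for the proofs
def decF (cz : PySem.Dict Int Int × List Int) (src : Int) : PySem.Dict Int Int × List Int :=
  if cz.1.contains src then
    let c2 := cz.1.modify src 0 (fun c => c - 1)
    if c2.getD src 0 == 0 then (c2, cz.2 ++ [src]) else (c2, cz.2)
  else cz

theorem contains_erase {ν : Type} (D : PySem.Dict Int ν) (z t : Int) :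
    (D.erase z).contains t = (D.contains t && !(t == z)) := by
  rcases eq_or_ne t z with rfl | h
  · simp only [PySem.Dict.contains, PySem.Dict.erase, List.any_filter]
    simp
  · have ht : (t == z) = false := by simp [h]
    simp only [PySem.Dict.contains, PySem.Dict.erase, List.any_filter, ht, Bool.not_false,
      Bool.and_true]
    congr 1
    funext a
    by_cases hp : a.1 = t <;> simp [hp, ht]

theorem liveCnt_erase (D : PySem.Dict Int (List Int)) {z : Int} (hz : D.contains z = true)
    (e : List Int) : liveCnt D e = liveCnt (D.erase z) e + e.count z := by
  induction e with
  | nil => simp [liveCnt]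
  | cons t e ih =>
    simp only [liveCnt, List.filter_cons, contains_erase, List.count_cons] at *
    rcases eq_or_ne t z with rfl | h
    · simp [hz]; omega
    · by_cases hc : D.contains t = true <;> simp [hc, h] <;> omega

theorem count_le_liveCnt (D : PySem.Dict Int (List Int)) {z : Int} (hz : D.contains z = true)
    (e : List Int) : e.count z ≤ liveCnt D e := by
  have : e.count z = (e.filter (fun t => D.contains t)).count z := (List.count_filter hz).symm
  rw [this, liveCnt]
  exact List.count_le_length

theorem keys_erase {ν : Type} (D : PySem.Dict Int ν) (z : Int) :
    (D.erase z).keys = D.keys.filter (fun n => !(n == z)) := by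
  simp only [PySem.Dict.keys, PySem.Dict.erase]
  induction D.items with
  | nil => rfl
  | cons p l ih =>
    by_cases hp : p.1 = z <;> simp [hp, ih]

theorem length_filter_ne (l : List Int) (z : Int) :
    (l.filter (fun n => !(n == z))).length + l.count z = l.length := by
  induction l with
  | nil => rfl
  | cons t l ih =>
    rcases eq_or_ne t z with rfl | h
    · simp; omega
    · simp [h]; omega

theorem getD_erase_of_ne (d : PySem.Dict Int Int) {z n : Int} (h : n ≠ z) (d0 : Int) :
    (d.erase z).getD n d0 = d.getD n d0 := by
  simp only [PySem.Dict.getD, PySem.Dict.get?, PySem.Dict.erase, List.find?_filter]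
  have hpred : (fun a : Int × Int => decide ((!(a.1 == z)) = true ∧ (a.1 == n) = true))
      = (fun a : Int × Int => a.1 == n) := by
    funext a
    by_cases ha : a.1 = n
    · simp [ha, h]
    · simp [ha]
  rw [hpred]

theorem nodup_key_eq {l : List (Int × List Int)} (h : (l.map (fun p => p.1)).Nodup)
    {n : Int} {e e' : List Int} (h1 : (n, e) ∈ l) (h2 : (n, e') ∈ l) : e = e' := by
  have := List.inj_on_of_nodup_map h h1 h2 rfl
  exact congrArg Prod.snd this

theorem insert_getD_self (d : PySem.Dict Int Int) {src : Int} (hnd : d.keys.Nodup)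
    (hc : d.contains src = true) : d.insert src (d.getD src 0) = d := by
  apply PySem.Dict.ext
  rw [PySem.Dict.items_insert_of_contains _ _ hc]
  conv_rhs => rw [← List.map_id d.items]
  apply List.map_congr_left
  intro p hp
  by_cases hps : p.1 = src
  · have hmem : (src, p.2) ∈ d.items := by rwa [← hps]
    have := PySem.Dict.getD_of_mem_items d hmem hnd 0
    simp only [hps, beq_self_eq_true, this]
    exact Prod.ext hps.symm rfl
  · simp [hps]

theorem contains_congr_keys (d d' : PySem.Dict Int Int) (h : d.keys = d'.keys) (n : Int) :
    d.contains n = d'.contains n := by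
  rw [PySem.Dict.contains_eq_decide_mem_keys, PySem.Dict.contains_eq_decide_mem_keys, h]

-- chunk lemma: decrements aimed at a node not in counts are no-ops
theorem decF_replicate_noop {src : Int} (k : Nat) (cz : PySem.Dict Int Int × List Int)
    (h : cz.1.contains src = false) :
    (List.replicate k src).foldl decF cz = cz := by
  induction k with
  | zero => rfl
  | succ k ih => simpa [List.replicate_succ, decF, h] using ih

-- chunk lemma: k decrements on a live node with counter c (k ≤ c, 0 < c) subtract k,
-- appending the node to zeros exactly when its counter lands on 0
theorem decF_replicate_live (src : Int) (k : Nat) :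
    ∀ (cz : PySem.Dict Int Int × List Int) (c : Int),
    cz.1.keys.Nodup →
    cz.1.contains src = true → cz.1.getD src 0 = c → (k : Int) ≤ c → 0 < c →
    (List.replicate k src).foldl decF cz
      = (cz.1.insert src (c - k), if c = k then cz.2 ++ [src] else cz.2) := by
  induction k with
  | zero =>
    intro cz c hnd hc hg _ hpos
    rw [List.replicate_zero, List.foldl_nil, Nat.cast_zero, sub_zero, ← hg,
      insert_getD_self cz.1 hnd hc, if_neg (by rw [hg]; omega)]
  | succ k ih =>
    intro cz c hnd hc hg hk hpos
    rw [List.replicate_succ, List.foldl_cons]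
    have hstep : decF cz src
        = if c - 1 == 0 then (cz.1.insert src (c-1), cz.2 ++ [src])
          else (cz.1.insert src (c-1), cz.2) := by
      simp only [decF, hc, if_pos, PySem.Dict.modify, hg, PySem.Dict.getD_insert_self]
    have hnd' : (cz.1.insert src (c-1)).keys.Nodup := by
      rwa [PySem.Dict.keys_insert_of_contains _ _ hc]
    by_cases h1 : c = 1
    · have hk0 : k = 0 := by push_cast at hk; omega
      subst h1 hk0
      simp only [hstep]
      norm_num
    · have hne : (c - 1 == 0) = false := by simp; omega
      rw [hstep, if_neg (by simp [hne])]
      have hc' : (cz.1.insert src (c-1)).contains src = true := by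
        simp [PySem.Dict.contains_insert_self]
      have hg' : (cz.1.insert src (c-1)).getD src 0 = c - 1 :=
        PySem.Dict.getD_insert_self _ _ _ 0
      have hrec := ih (cz.1.insert src (c-1), cz.2) (c-1) hnd' hc' hg'
        (by push_cast at hk ⊢; omega) (by omega)
      rw [hrec, PySem.Dict.insert_insert_self]
      have h2 : c - 1 - (k : Int) = c - ((k+1 : Nat) : Int) := by push_cast; ring
      have h3 : (c - 1 = (k : Int)) ↔ (c = ((k+1 : Nat) : Int)) := by push_cast; omega
      rw [h2]
      by_cases hcc : c = ((k+1 : Nat) : Int)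
      · rw [if_pos (h3.mpr hcc), if_pos hcc]
      · rw [if_neg (fun hx => hcc (h3.mp hx)), if_neg hcc]

-- the whole decrement loop of one bLoop round, chunk by chunk over L (:= g.items)
theorem fold_chunks (D : PySem.Dict Int (List Int)) {z : Int}
    (hzk : z ∈ D.keys)
    (hpos : ∀ p ∈ D.items, p.1 ≠ z → 0 < liveCnt D p.2) :
    ∀ (L : List (Int × List Int)) (cz : PySem.Dict Int Int × List Int),
    (L.map (fun p => p.1)).Nodup →
    cz.1.keys.Nodup →
    (∀ n : Int, cz.1.contains n = true → n ∈ D.keys ∧ n ≠ z) →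
    (∀ p ∈ L, cz.1.contains p.1 = true → p ∈ D.items ∧ cz.1.getD p.1 0 = (liveCnt D p.2 : Int)) →
    ∃ res : PySem.Dict Int Int × List Int,
      (L.flatMap (fun p => List.replicate (p.2.count z) p.1)).foldl decF cz = res ∧
      res.1.keys = cz.1.keys ∧
      (∀ p ∈ L, cz.1.contains p.1 = true →
        res.1.getD p.1 0 = (liveCnt D p.2 : Int) - (p.2.count z : Int)) ∧
      (∀ n : Int, (∀ p ∈ L, p.1 ≠ n) → res.1.getD n 0 = cz.1.getD n 0) ∧
      res.2 = cz.2 ++ (L.filter (fun p => cz.1.contains p.1 &&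
        ((liveCnt D p.2 : Int) == (p.2.count z : Int)))).map (fun p => p.1) := by
  have hzc : D.contains z = true := (PySem.Dict.contains_iff_mem_keys D z).mpr hzk
  intro L
  induction L with
  | nil =>
    intro cz _ _ _ _
    exact ⟨cz, by simp, rfl, by simp, fun n _ => rfl, by simp⟩
  | cons p L ih =>
    intro cz hLnd hnd hczk hval
    rw [List.flatMap_cons, List.foldl_append]
    rw [List.map_cons, List.nodup_cons] at hLnd
    by_cases hcp : cz.1.contains p.1 = true
    · -- p is live: its chunk subtracts count z from its counter
      obtain ⟨hpD, hgd⟩ := hval p (List.mem_cons_self) hcp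
      obtain ⟨hpk, hpz⟩ := hczk p.1 hcp
      have hlpos : 0 < liveCnt D p.2 := hpos p hpD hpz
      have hcount : p.2.count z ≤ liveCnt D p.2 := count_le_liveCnt D hzc p.2
      rw [decF_replicate_live p.1 (p.2.count z) cz ((liveCnt D p.2 : Int)) hnd hcp hgd
        (by exact_mod_cast hcount) (by exact_mod_cast hlpos)]
      set d' := cz.1.insert p.1 ((liveCnt D p.2 : Int) - (p.2.count z : Int)) with hd'
      set z2 := (if (liveCnt D p.2 : Int) = (p.2.count z : Int) then cz.2 ++ [p.1] else cz.2)
        with hz2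
      have hkeq : d'.keys = cz.1.keys := PySem.Dict.keys_insert_of_contains _ _ hcp
      have hceq : ∀ n, d'.contains n = cz.1.contains n := contains_congr_keys _ _ hkeq
      have hnd' : d'.keys.Nodup := by rwa [hkeq]
      have hne : ∀ p' ∈ L, p'.1 ≠ p.1 := by
        intro p' hp' hx
        exact hLnd.1 (hx ▸ List.mem_map_of_mem hp')
      obtain ⟨res, heq, hkeys, hvals, huntouched, hsnd⟩ := ih (d', z2) hLnd.2 hnd'
        (fun n hn => hczk n ((hceq n) ▸ hn))
        (by
          intro p' hp' hc'
          have hcz : cz.1.contains p'.1 = true := (hceq p'.1) ▸ hc'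
          refine ⟨(hval p' (List.mem_cons_of_mem _ hp') hcz).1, ?_⟩
          show d'.getD p'.1 0 = _
          rw [hd', PySem.Dict.getD_insert, if_neg (hne p' hp')]
          exact (hval p' (List.mem_cons_of_mem _ hp') hcz).2)
      refine ⟨res, heq, by rw [hkeys, hkeq], ?_,
        (fun n hn => by
          rw [huntouched n (fun p' hp' => hn p' (List.mem_cons_of_mem _ hp')), hd',
            PySem.Dict.getD_insert, if_neg (fun hx => hn p (List.mem_cons_self) hx.symm)]), ?_⟩
      · intro p' hp' hc'
        rcases List.mem_cons.mp hp' with rfl | hp'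
        · have : res.1.getD p'.1 0 = d'.getD p'.1 0 := huntouched p'.1 hne
          rw [this, hd', PySem.Dict.getD_insert_self]
        · have hcd : d'.contains p'.1 = true := (hceq p'.1).symm ▸ hc'
          exact hvals p' hp' hcd
      · rw [hsnd]
        show z2 ++ _ = _
        rw [List.filter_cons]
        have hfc : (L.filter (fun p' => d'.contains p'.1 &&
              ((liveCnt D p'.2 : Int) == (p'.2.count z : Int))))
            = (L.filter (fun p' => cz.1.contains p'.1 &&
              ((liveCnt D p'.2 : Int) == (p'.2.count z : Int)))) := by
          apply List.filter_congr
          intro p' _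
          rw [hceq p'.1]
        rw [hfc, hz2]
        by_cases hcc : (liveCnt D p.2 : Int) = (p.2.count z : Int)
        · rw [if_pos hcc, if_pos (by simp [hcp, hcc])]
          simp
        · rw [if_neg hcc, if_neg (by simp [hcc])]
    · -- p is not in counts (dead, or = z): its chunk is a no-op
      have hcpf : cz.1.contains p.1 = false := by
        revert hcp; cases cz.1.contains p.1 <;> simp
      rw [decF_replicate_noop _ _ hcpf]
      obtain ⟨res, heq, hkeys, hvals, huntouched, hsnd⟩ := ih cz hLnd.2 hnd hczk
        (fun p' hp' => hval p' (List.mem_cons_of_mem _ hp'))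
      refine ⟨res, heq, hkeys, ?_,
        (fun n hn => huntouched n (fun p' hp' => hn p' (List.mem_cons_of_mem _ hp'))), ?_⟩
      · intro p' hp' hc'
        rcases List.mem_cons.mp hp' with rfl | hp'
        · rw [hcpf] at hc'; exact absurd hc' (by simp)
        · exact hvals p' hp' hc'
      · rw [hsnd, List.filter_cons, if_neg (by simp [hcpf])]

-- main loop equivalence: Kahn's loop state simulates A's shrinking dict
theorem loop_eq (g : PySem.Dict Int (List Int)) (hg : g.keys.Nodup)
    (rev : PySem.Dict Int (List Int))
    (hrev : ∀ z : Int, g.contains z = true →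
      rev.getD z [] = g.items.flatMap (fun p => List.replicate (p.2.count z) p.1)) :
    ∀ (r : Nat) (D : PySem.Dict Int (List Int)) (counts : PySem.Dict Int Int) (zeros : List Int),
    D.keys.Nodup →
    (∀ p ∈ D.items, p ∈ g.items) →
    counts.items = D.items.map (fun p => (p.1, (liveCnt D p.2 : Int))) →
    zeros.Nodup →
    (∀ n : Int, n ∈ zeros ↔ ∃ e, (n, e) ∈ D.items ∧ liveCnt D e = 0) →
    r = D.size →
    bLoop rev counts zeros r = aLoop D := by
  intro r
  induction r with
  | zero =>
    intro D counts zeros _ _ _ _ _ hr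
    rw [bLoop, aLoop, if_pos hr.symm]
  | succ r ih =>
    intro D counts zeros hDnd hsub hcounts hznd hzmem hr
    have hsz : D.size ≠ 0 := by omega
    have hkeys_counts : counts.keys = D.keys := by
      simp only [PySem.Dict.keys, hcounts, List.map_map]
      rfl
    have hgnd : (g.items.map (fun p => p.1)).Nodup := hg
    have hDnd' : (D.items.map (fun p : Int × List Int => p.1)).Nodup := hDnd
    -- the candidate list of A's pass
    set q := fun p : Int × List Int => !(p.2.any fun t => D.contains t) with hq
    have hqiff : ∀ p : Int × List Int, q p = true ↔ liveCnt D p.2 = 0 := by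
      intro p
      simp [hq, liveCnt, List.length_eq_zero_iff, List.filter_eq_nil_iff]
    set cand := (D.items.filter q).map (fun p => p.1) with hcand
    have hscan : aScan D = (D.items.any q, cand) := aScan_eq D
    have hmemc : ∀ n : Int, n ∈ cand ↔ ∃ e, (n, e) ∈ D.items ∧ liveCnt D e = 0 := by
      intro n
      simp only [hcand, List.mem_map, List.mem_filter]
      constructor
      · rintro ⟨p, ⟨hp, hqp⟩, rfl⟩
        exact ⟨p.2, hp, (hqiff p).mp hqp⟩
      · rintro ⟨e, he, hl⟩
        exact ⟨(n, e), ⟨he, (hqiff _).mpr hl⟩, rfl⟩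
    have hcandnd : cand.Nodup := by
      exact hDnd'.sublist (List.Sublist.map _ List.filter_sublist)
    have hperm : zeros.Perm cand := (List.perm_ext_iff_of_nodup hznd hcandnd).mpr
      (fun n => (hzmem n).trans (hmemc n).symm)
    have hlen : zeros.length = cand.length := hperm.length_eq
    by_cases h1 : zeros.length = 1
    · -- exactly one candidate: both sides erase it and loop
      obtain ⟨z, hzz⟩ := List.length_eq_one_iff.mp h1
      subst hzz
      obtain ⟨n0, hn0⟩ := List.length_eq_one_iff.mp (hlen ▸ h1)
      have hzc : z ∈ cand := hperm.subset (List.mem_cons_self)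
      have hcz : cand = [z] := by
        rw [hn0] at hzc ⊢
        simp only [List.mem_singleton] at hzc
        rw [hzc]
      have hA : aLoop D = aLoop (D.erase z) := by
        rw [aLoop]
        have hany : D.items.any q = true := by
          have : z ∈ cand := hzc
          simp only [hcand, List.mem_map, List.mem_filter] at this
          obtain ⟨p, ⟨hp, hqp⟩, _⟩ := this
          exact List.any_eq_true.mpr ⟨p, hp, hqp⟩
        simp [hsz, hscan, hany, hcz]
      rw [hA]
      -- facts about z
      obtain ⟨ez, hez, hlz⟩ := (hzmem z).mp List.mem_cons_self
      have hzk : z ∈ D.keys := List.mem_map_of_mem hez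
      have hzcD : D.contains z = true := (PySem.Dict.contains_iff_mem_keys D z).mpr hzk
      have hzg : g.contains z = true :=
        (PySem.Dict.contains_iff_mem_keys g z).mpr (List.mem_map_of_mem (hsub _ hez))
      have hposD : ∀ p ∈ D.items, p.1 ≠ z → 0 < liveCnt D p.2 := by
        intro p hp hne
        by_contra hc
        have h0 : liveCnt D p.2 = 0 := by omega
        have : p.1 ∈ cand := (hmemc p.1).mpr ⟨p.2, hp, h0⟩
        rw [hcz] at this
        simp only [List.mem_singleton] at this
        exact hne this
      have hcnd : counts.keys.Nodup := hkeys_counts ▸ hDnd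
      have hend : (counts.erase z).keys.Nodup := by
        rw [keys_erase]
        exact hcnd.filter _
      have hczk : ∀ n : Int, (counts.erase z).contains n = true → n ∈ D.keys ∧ n ≠ z := by
        intro n hn
        rw [contains_erase] at hn
        simp only [Bool.and_eq_true, Bool.not_eq_true', beq_eq_false_iff_ne, ne_eq] at hn
        refine ⟨?_, hn.2⟩
        rw [← hkeys_counts]
        exact (PySem.Dict.contains_iff_mem_keys counts n).mp hn.1
      have hDitem : ∀ n : Int, n ∈ D.keys → ∃ e, (n, e) ∈ D.items := by
        intro n hn
        simp only [PySem.Dict.keys, List.mem_map] at hn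
        obtain ⟨p, hp, h1'⟩ := hn
        exact ⟨p.2, h1' ▸ hp⟩
      have hval : ∀ p ∈ g.items, (counts.erase z).contains p.1 = true →
          p ∈ D.items ∧ (counts.erase z).getD p.1 0 = (liveCnt D p.2 : Int) := by
        intro p hp hc
        obtain ⟨hnk, hnz⟩ := hczk p.1 hc
        obtain ⟨e, he⟩ := hDitem p.1 hnk
        have heg : (p.1, e) ∈ g.items := hsub _ he
        have hee : e = p.2 := nodup_key_eq hgnd heg hp
        subst hee
        have hpD : p ∈ D.items := he
        refine ⟨hpD, ?_⟩
        rw [getD_erase_of_ne counts hnz]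
        have hmemi : (p.1, (liveCnt D p.2 : Int)) ∈ counts.items := by
          rw [hcounts]
          exact List.mem_map_of_mem hpD
        exact PySem.Dict.getD_of_mem_items counts hmemi hcnd 0
      obtain ⟨res, heq, hkeys, hvals, huntouched, hsnd⟩ :=
        fold_chunks D hzk hposD g.items (counts.erase z, []) hgnd hend hczk hval
      -- reduce bLoop one step
      have hred : bLoop rev counts [z] (r + 1)
          = bLoop rev ((rev.getD z []).foldl decF (counts.erase z, [])).1
              ((rev.getD z []).foldl decF (counts.erase z, [])).2 r := by
        rw [bLoop]
        rfl
      rw [hred, hrev z hzg, heq]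
      -- the six invariants for D.erase z
      have hDe_nd : (D.erase z).keys.Nodup := by
        rw [keys_erase]
        exact hDnd.filter _
      have hsub' : ∀ p ∈ (D.erase z).items, p ∈ g.items := by
        intro p hp
        exact hsub p (List.mem_of_mem_filter hp)
      have hkeys_res : res.1.keys = (D.erase z).keys := by
        rw [hkeys]
        show (counts.erase z).keys = _
        rw [keys_erase, keys_erase, hkeys_counts]
      have hresnd : res.1.keys.Nodup := hkeys_res ▸ hDe_nd
      have hcontains_en : ∀ n : Int, n ∈ D.keys → n ≠ z →
          (counts.erase z).contains n = true := by
        intro n hnk hnz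
        rw [contains_erase]
        have : counts.contains n = true := by
          rw [PySem.Dict.contains_iff_mem_keys, hkeys_counts]
          exact hnk
        simp [this, hnz]
      have hitems : res.1.items
          = (D.erase z).items.map (fun p => (p.1, (liveCnt (D.erase z) p.2 : Int))) := by
        rw [PySem.Dict.items_eq_map_keys res.1 hresnd 0, hkeys_res,
          PySem.Dict.items_eq_map_keys (D.erase z) hDe_nd [], List.map_map]
        apply List.map_congr_left
        intro n hn
        have hn' : n ∈ D.keys ∧ n ≠ z := by
          rw [keys_erase] at hn
          simp only [List.mem_filter, Bool.not_eq_true', beq_eq_false_iff_ne, ne_eq] at hn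
          exact ⟨hn.1, hn.2⟩
        obtain ⟨e, he⟩ := hDitem n hn'.1
        have heg : (n, e) ∈ g.items := hsub _ he
        have hce : (counts.erase z).contains n = true := hcontains_en n hn'.1 hn'.2
        have hv := hvals (n, e) heg hce
        have hmemE : (n, e) ∈ (D.erase z).items := by
          simp only [PySem.Dict.erase]
          exact List.mem_filter.mpr ⟨he, by simp [hn'.2]⟩
        have hee : (D.erase z).getD n [] = e :=
          PySem.Dict.getD_of_mem_items _ hmemE hDe_nd []
        have hle := liveCnt_erase D hzcD e
        simp only [Function.comp, Prod.mk.injEq]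
        refine ⟨trivial, ?_⟩
        show res.1.getD n 0 = (liveCnt (D.erase z) ((D.erase z).getD n []) : Int)
        rw [hee, hv]
        push_cast [hle]
        ring
      have hsnd' : res.2 = (g.items.filter (fun p => (counts.erase z).contains p.1 &&
          ((liveCnt D p.2 : Int) == ((p.2.count z : Nat) : Int)))).map (fun p => p.1) := by
        rw [hsnd]
        rfl
      have hznd' : res.2.Nodup := by
        rw [hsnd']
        exact hgnd.sublist (List.Sublist.map _ List.filter_sublist)
      have hzmem' : ∀ n : Int, n ∈ res.2
          ↔ ∃ e, (n, e) ∈ (D.erase z).items ∧ liveCnt (D.erase z) e = 0 := by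
        intro n
        rw [hsnd']
        simp only [List.mem_map, List.mem_filter, Bool.and_eq_true, beq_iff_eq]
        constructor
        · rintro ⟨p, ⟨hpg, hcc, hcnt⟩, rfl⟩
          obtain ⟨hpD, _⟩ := hval p hpg hcc
          have hnz : p.1 ≠ z := (hczk p.1 hcc).2
          refine ⟨p.2, ?_, ?_⟩
          · show (p.1, p.2) ∈ (D.erase z).items
            simp only [PySem.Dict.erase]
            exact List.mem_filter.mpr ⟨hpD, by simp [hnz]⟩
          · have hle := liveCnt_erase D hzcD p.2
            have hcnt' : liveCnt D p.2 = p.2.count z := by exact_mod_cast hcnt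
            omega
        · rintro ⟨e, heE, h0⟩
          have heD : (n, e) ∈ D.items := List.mem_of_mem_filter heE
          have hnz : n ≠ z := by
            have := (List.mem_filter.mp heE).2
            simpa using this
          refine ⟨(n, e), ⟨hsub _ heD, ?_, ?_⟩, rfl⟩
          · exact hcontains_en n (List.mem_map_of_mem heD) hnz
          · have hle := liveCnt_erase D hzcD e
            have : liveCnt D e = e.count z := by omega
            exact_mod_cast congrArg (Nat.cast : Nat → Int) this
      have hsize : r = (D.erase z).size := by
        have h1' : D.size = D.keys.length := by simp [PySem.Dict.keys, PySem.Dict.size]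
        have h2' : (D.erase z).size = (D.erase z).keys.length := by
          simp [PySem.Dict.keys, PySem.Dict.size]
        have h3' := length_filter_ne D.keys z
        have h4' : D.keys.count z = 1 := List.count_eq_one_of_mem hDnd hzk
        rw [h2', keys_erase]
        omega
      exact ih (D.erase z) res.1 res.2 hDe_nd hsub' hitems hznd' hzmem' hsize
    · -- zero or several candidates: both sides answer false
      have hb : bLoop rev counts zeros (r + 1) = false := by
        rw [bLoop.eq_def]
        simp only [if_pos h1]
      rw [hb, aLoop]
      by_cases hc0 : cand = []
      · have hfil : D.items.filter q = [] := by
          rwa [hcand, List.map_eq_nil_iff] at hc0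
        have hfst : D.items.any q = false := by
          rw [List.filter_eq_nil_iff] at hfil
          simp only [List.any_eq_false]
          exact hfil
        simp [hsz, hscan, hfst]
      · have hfst : D.items.any q = true := by
          obtain ⟨p, hp⟩ := List.exists_mem_of_ne_nil _ hc0
          rw [hcand] at hp
          simp only [List.mem_map, List.mem_filter] at hp
          obtain ⟨p', ⟨hp', hq'⟩, _⟩ := hp
          exact List.any_eq_true.mpr ⟨p', hp', hq'⟩
        have hlen2 : 1 < cand.length := by
          rcases Nat.lt_or_ge cand.length 2 with hlt | hge
          · interval_cases hl : cand.length
            · exact absurd (List.length_eq_zero_iff.mp hl) hc0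
            · omega
          · omega
        simp [hsz, hscan, hfst, hlen2]

-- one node's contribution to the reverse index
def revStep (g : PySem.Dict Int (List Int)) (d : PySem.Dict Int (List Int))
    (p : Int × List Int) : PySem.Dict Int (List Int) :=
  p.2.foldl (fun d t => if g.contains t then d.modify t [] (fun l => l ++ [p.1]) else d) d

theorem rep_aux (g : PySem.Dict Int (List Int)) {z : Int} (hz : g.contains z = true)
    (v : Int) (e : List Int) :
    (((e.filter (fun t => g.contains t)).map (fun t => (t, v))).filter
        (fun q => q.1 == z)).map (fun q => q.2)
      = List.replicate (e.count z) v := by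
  induction e with
  | nil => rfl
  | cons t e ih =>
    rcases eq_or_ne t z with rfl | h
    · simp only [List.filter_cons, hz, List.count_cons, if_pos, List.map_cons, beq_self_eq_true,
        List.replicate_succ]
      simpa [List.replicate_succ] using ih
    · by_cases hc : g.contains t = true
      · simpa [List.filter_cons, hc, h, List.count_cons] using ih
      · simpa [List.filter_cons, hc, h, List.count_cons] using ih

theorem revStep_getD (g : PySem.Dict Int (List Int)) {z : Int} (hz : g.contains z = true)
    (d : PySem.Dict Int (List Int)) (p : Int × List Int) :
    (revStep g d p).getD z [] = d.getD z [] ++ List.replicate (p.2.count z) p.1 := by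
  show (p.2.foldl (fun d t =>
      if g.contains t then d.modify t [] (fun l => l ++ [p.1]) else d) d).getD z [] = _
  rw [← List.foldl_filter (p := fun t => g.contains t)
    (f := fun (d : PySem.Dict Int (List Int)) t => d.modify t [] (fun l => l ++ [p.1]))]
  rw [show (fun (d : PySem.Dict Int (List Int)) (t : Int) =>
      d.modify t [] (fun l => l ++ [p.1]))
    = (fun (d : PySem.Dict Int (List Int)) (t : Int) =>
        d.modify ((t, p.1) : Int × Int).1 [] (fun l => l ++ [((t, p.1) : Int × Int).2])) from rfl]
  rw [← List.foldl_map (f := fun t : Int => (t, p.1))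
    (g := fun (d : PySem.Dict Int (List Int)) (q : Int × Int) =>
      d.modify q.1 [] (fun l => l ++ [q.2]))]
  rw [PySem.Dict.getD_foldl_modify_append]
  rw [rep_aux g hz p.1 p.2]

theorem revd_getD (g : PySem.Dict Int (List Int)) {z : Int} (hz : g.contains z = true) :
    ∀ (l : List (Int × List Int)) (d : PySem.Dict Int (List Int)),
    (l.foldl (revStep g) d).getD z []
      = d.getD z [] ++ l.flatMap (fun p => List.replicate (p.2.count z) p.1) := by
  intro l
  induction l with
  | nil => simp
  | cons p l ih =>
    intro d
    rw [List.foldl_cons, ih (revStep g d p), revStep_getD g hz d p, List.flatMap_cons,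
      List.append_assoc]

theorem build_eq (g : PySem.Dict Int (List Int)) (hg : g.keys.Nodup) :
    ∃ cr : PySem.Dict Int Int × PySem.Dict Int (List Int),
      g.items.foldl (fun (cr : PySem.Dict Int Int × PySem.Dict Int (List Int)) p =>
        let crev := p.2.foldl (fun (s : Int × PySem.Dict Int (List Int)) t =>
          if g.contains t then (s.1 + 1, s.2.modify t [] (fun l => l ++ [p.1])) else s) (0, cr.2)
        (cr.1.insert p.1 crev.1, crev.2)) (PySem.Dict.empty, PySem.Dict.empty) = cr ∧
      cr.1.items = g.items.map (fun p => (p.1, (liveCnt g p.2 : Int))) ∧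
      (∀ z : Int, g.contains z = true →
        cr.2.getD z [] = g.items.flatMap (fun p => List.replicate (p.2.count z) p.1)) := by
  have hinner : ∀ (p : Int × List Int) (d : PySem.Dict Int (List Int)),
      p.2.foldl (fun (s : Int × PySem.Dict Int (List Int)) t =>
        if g.contains t then (s.1 + 1, s.2.modify t [] (fun l => l ++ [p.1])) else s) (0, d)
      = (((p.2.countP (fun t => g.contains t) : Nat) : Int), revStep g d p) := by
    intro p d
    have hfun : (fun (s : Int × PySem.Dict Int (List Int)) t =>
        if g.contains t then (s.1 + 1, s.2.modify t [] (fun l => l ++ [p.1])) else s)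
      = (fun s t => ((fun (a : Int) t => if g.contains t then a + 1 else a) s.1 t,
          (fun (d : PySem.Dict Int (List Int)) t =>
            if g.contains t then d.modify t [] (fun l => l ++ [p.1]) else d) s.2 t)) := by
      funext s t
      by_cases hc : g.contains t = true <;> simp [hc]
    rw [hfun]
    rw [PySem.List.foldl_prod_mk (fun (a : Int) t => if g.contains t then a + 1 else a)
      (fun (d : PySem.Dict Int (List Int)) t =>
        if g.contains t then d.modify t [] (fun l => l ++ [p.1]) else d) p.2 0 d]
    rw [PySem.List.foldl_count_if (fun t => g.contains t) p.2 0]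
    rw [zero_add]
    rfl
  have houter : g.items.foldl (fun (cr : PySem.Dict Int Int × PySem.Dict Int (List Int)) p =>
        let crev := p.2.foldl (fun (s : Int × PySem.Dict Int (List Int)) t =>
          if g.contains t then (s.1 + 1, s.2.modify t [] (fun l => l ++ [p.1])) else s) (0, cr.2)
        (cr.1.insert p.1 crev.1, crev.2)) (PySem.Dict.empty, PySem.Dict.empty)
      = (g.items.foldl (fun d p =>
          d.insert p.1 (((p.2.countP (fun t => g.contains t) : Nat) : Int))) PySem.Dict.empty,
         g.items.foldl (revStep g) PySem.Dict.empty) := by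
    have hfun2 : (fun (cr : PySem.Dict Int Int × PySem.Dict Int (List Int)) p =>
        let crev := p.2.foldl (fun (s : Int × PySem.Dict Int (List Int)) t =>
          if g.contains t then (s.1 + 1, s.2.modify t [] (fun l => l ++ [p.1])) else s) (0, cr.2)
        (cr.1.insert p.1 crev.1, crev.2))
      = (fun cr p => ((fun (d : PySem.Dict Int Int) p =>
            d.insert p.1 (((p.2.countP (fun t => g.contains t) : Nat) : Int))) cr.1 p,
          (fun d p => revStep g d p) cr.2 p)) := by
      funext cr p
      show _ = (cr.1.insert p.1 _, revStep g cr.2 p)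
      rw [hinner p cr.2]
    rw [hfun2]
    rw [PySem.List.foldl_prod_mk (fun (d : PySem.Dict Int Int) p =>
        d.insert p.1 (((p.2.countP (fun t => g.contains t) : Nat) : Int)))
      (fun d p => revStep g d p) g.items PySem.Dict.empty PySem.Dict.empty]
  refine ⟨_, houter, ?_, ?_⟩
  · -- the counters dict: one fresh insert per node, in order
    have hfresh := PySem.Dict.items_foldl_insert_fresh g.items (fun p => p.1)
      (fun p => ((p.2.countP (fun t => g.contains t) : Nat) : Int)) PySem.Dict.empty
      (fun a _ => by simp [PySem.Dict.contains_empty]) hg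
    simpa [liveCnt, List.countP_eq_length_filter] using hfresh
  · -- the reverse index: per target z, sources in node order with multiplicity
    intro z hz
    show (g.items.foldl (revStep g) PySem.Dict.empty).getD z [] = _
    rw [revd_getD g hz g.items PySem.Dict.empty]
    simp [PySem.Dict.getD_empty]

-- ===== VERDICT (by name: the statement is the Claim_ definition above) =====
theorem check_full_order_spec : Claim_equal_check_full_order := by
  intro l _
  unfold Spec_check_full_order check_full_order
  set g := PySem.Dict.ofList l with hgdef
  have hg : g.keys.Nodup := PySem.Dict.nodup_keys_ofList l
  obtain ⟨cr, hcr, hc1, hc2⟩ := build_eq g hg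
  simp only [check_full_order_alt]
  rw [← hgdef, hcr]
  set zs := (cr.1.items.filter (fun p => p.2 == 0)).map (fun p => p.1) with hzs
  have hzeros : zs = (g.items.filter
      (fun p => ((liveCnt g p.2 : Int) == (0 : Int)))).map (fun p => p.1) := by
    rw [hzs, hc1, List.filter_map, List.map_map]
    rfl
  have hgnd : (g.items.map (fun p : Int × List Int => p.1)).Nodup := hg
  have hznd : zs.Nodup := by
    rw [hzeros]
    exact hgnd.sublist (List.Sublist.map _ List.filter_sublist)
  have hzmem : ∀ n : Int, n ∈ zs ↔ ∃ e, (n, e) ∈ g.items ∧ liveCnt g e = 0 := by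
    intro n
    rw [hzeros]
    simp only [List.mem_map, List.mem_filter, beq_iff_eq]
    constructor
    · rintro ⟨p, ⟨hp, h0⟩, rfl⟩
      exact ⟨p.2, hp, by exact_mod_cast h0⟩
    · rintro ⟨e, he, h0⟩
      exact ⟨(n, e), ⟨he, by exact_mod_cast congrArg (Nat.cast : Nat → Int) h0⟩, rfl⟩
  have hsz : cr.1.size = g.size := by
    simp [PySem.Dict.size, hc1]
  exact (loop_eq g hg cr.2 hc2 cr.1.size g cr.1 zs hg (fun p hp => hp) hc1 hznd hzmem hsz).symm
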